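-- pv_equiv track=rewrite | github.com/SuperVortexNicolas11/HyperOS-Port-Python | src/app/diff_report.py | _group_paths_by_partition
-- ===== SOURCE A (Python) =====
-- PARTITION_KEYS = {
--     "system",
--     "product",
--     "system_ext",
--     "vendor",
--     "odm",
--     "mi_ext",
--     "vendor_dlkm",
--     "vendor_boot",
--     "boot",
-- }
--
-- def _partition_for_path(path: str) -> str:
--     first = path.split("/", 1)[0]
--     if first in PARTITION_KEYS:
--         return first
--     return "_root"
--
-- def _group_paths_by_partition(paths: list[str]) -> dict[str, list[str]]:
--     grouped: dict[str, list[str]] = {}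
--     for path in paths:
--         partition = _partition_for_path(path)
--         grouped.setdefault(partition, []).append(path)
--     for partition, entries in grouped.items():
--         grouped[partition] = sorted(entries)
--     return dict(sorted(grouped.items(), key=lambda item: item[0]))
-- ===== SOURCE B (Python) =====
-- PARTITION_KEYS = {
--     "system",
--     "product",
--     "system_ext",
--     "vendor",
--     "odm",
--     "mi_ext",
--     "vendor_dlkm",
--     "vendor_boot",
--     "boot",
-- }
--
-- _ALL_PARTITIONS = sorted(PARTITION_KEYS | {"_root"})
--
--
-- def _partition_for_path(path: str) -> str:
--     first = path.split("/", 1)[0]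
--     if first in PARTITION_KEYS:
--         return first
--     return "_root"
--
--
-- def _group_paths_by_partition(paths: list[str]) -> dict[str, list[str]]:
--     # Enumerate the fixed, already-sorted universe of possible partitions once;
--     # select and sort each partition's paths directly.  No dict accumulation,
--     # no per-bucket re-assignment, no final key sort.
--     result: dict[str, list[str]] = {}
--     for key in _ALL_PARTITIONS:
--         bucket = sorted(p for p in paths if _partition_for_path(p) == key)
--         if bucket:
--             result[key] = bucket
--     return result
-- ===== Notes on version B (the rewrite author's own statement) =====
-- stated objective: simpler
-- what changed: Instead of accumulating a dict via setdefault, sorting each bucket in a second pass and finally sorting the keys, B iterates once over the fixed sorted universe of 10 possible partitions, filter-and-sorts each partition's paths directly, and emits non-empty buckets in order, so no dict accumulation, bucket re-assignment or key sort is needed.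
import Mathlib
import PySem

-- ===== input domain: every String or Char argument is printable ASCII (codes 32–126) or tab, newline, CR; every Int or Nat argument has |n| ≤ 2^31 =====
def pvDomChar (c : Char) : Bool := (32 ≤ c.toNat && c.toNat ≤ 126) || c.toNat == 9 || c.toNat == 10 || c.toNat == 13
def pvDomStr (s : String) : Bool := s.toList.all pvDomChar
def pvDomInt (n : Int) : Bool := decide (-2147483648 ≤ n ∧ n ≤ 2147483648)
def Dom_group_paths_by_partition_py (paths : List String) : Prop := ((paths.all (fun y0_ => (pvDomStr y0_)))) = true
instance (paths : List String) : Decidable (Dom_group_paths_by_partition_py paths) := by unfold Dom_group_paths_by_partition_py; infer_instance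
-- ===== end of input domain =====

-- B replaces A's setdefault-accumulate / sort-each-bucket / sort-keys structure by one pass
-- over the fixed sorted universe of the 10 possible partitions, filter-and-sorting each
-- partition's bucket directly (objective: simpler).

-- ===== PORT A =====

-- PARTITION_KEYS (a Python set literal of 9 distinct strings)
def pvPartitionKeys : PySem.Set String :=
  PySem.Set.ofList ["system", "product", "system_ext", "vendor", "odm", "mi_ext",
                    "vendor_dlkm", "vendor_boot", "boot"]

-- _partition_for_path (shared module helper; B's Python calls the same function).
-- path.split("/", 1) with a non-empty separator always returns `some` of a non-empty
-- list, so the Python `[0]` is its head.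
def partition_for_path (path : String) : String :=
  let first := ((PySem.Str.splitMax? path "/" 1).getD []).headD ""
  if pvPartitionKeys.contains first then first else "_root"

def group_paths_by_partition_py (paths : List String) : List (String × List String) :=
  -- grouped: dict accumulated by setdefault(partition, []).append(path)
  let grouped : PySem.Dict String (List String) :=
    paths.foldl (fun d path => d.modify (partition_for_path path) [] (fun v => v ++ [path]))
      PySem.Dict.empty
  -- for partition, entries in grouped.items(): grouped[partition] = sorted(entries)
  let grouped2 : PySem.Dict String (List String) :=
    grouped.items.foldl (fun d kv => d.insert kv.1 (PySem.List.sorted kv.2 (fun x => x))) grouped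
  -- dict(sorted(grouped.items(), key=lambda item: item[0])): keys are distinct, so the
  -- resulting dict's items are exactly the sorted items list
  PySem.List.sorted grouped2.items (fun kv => kv.1)

-- ===== PORT B =====

-- _ALL_PARTITIONS = sorted(PARTITION_KEYS | {"_root"}) (computed once at module load)
def pvAllPartitions : List String :=
  ["_root", "boot", "mi_ext", "odm", "product", "system", "system_ext",
   "vendor", "vendor_boot", "vendor_dlkm"]

def group_paths_by_partition_py_alt (paths : List String) : List (String × List String) :=
  pvAllPartitions.foldl (fun acc key =>
    let bucket := PySem.List.sorted (paths.filter (fun p => partition_for_path p == key))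
      (fun x => x)
    if bucket.isEmpty then acc else acc ++ [(key, bucket)]) []

-- ===== PRECONDITION & SPEC =====
def Spec_group_paths_by_partition_py (paths : List String) (out : List (String × List String)) : Prop := out = group_paths_by_partition_py_alt paths
instance (paths : List String) (out : List (String × List String)) : Decidable (Spec_group_paths_by_partition_py paths out) := by unfold Spec_group_paths_by_partition_py; infer_instance

-- ===== CLAIM (what is proved, stated in full; the proofs are below) =====
def Claim_equal_group_paths_by_partition_py : Prop := ∀ (paths : List String), Dom_group_paths_by_partition_py paths → Spec_group_paths_by_partition_py paths (group_paths_by_partition_py paths)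

-- ===== LEMMAS AND PROOFS =====

-- the sorted bucket of partition k
def pvBucket (paths : List String) (k : String) : List String :=
  PySem.List.sorted (paths.filter (fun p => partition_for_path p == k)) (fun x => x)

-- B's append-if fold is a filter-map over the fixed key list
lemma alt_eq_filter_map (paths : List String) :
    group_paths_by_partition_py_alt paths
      = (pvAllPartitions.filter (fun k => !(pvBucket paths k).isEmpty)).map
          (fun k => (k, pvBucket paths k)) := by
  unfold group_paths_by_partition_py_alt
  have hf : (fun (acc : List (String × List String)) key =>
      let bucket := PySem.List.sorted (paths.filter (fun p => partition_for_path p == key)) (fun x => x)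
      if bucket.isEmpty then acc else acc ++ [(key, bucket)])
      = (fun acc k => if (fun k => !(pvBucket paths k).isEmpty) k = true
          then acc ++ [(fun k => (k, pvBucket paths k)) k] else acc) := by
    funext acc k
    simp only [pvBucket]
    cases h : (PySem.List.sorted (paths.filter (fun p => partition_for_path p == k)) (fun x => x)).isEmpty <;> simp
  rw [hf, PySem.List.foldl_append_if]
  simp

-- a foldl of in-place inserts does not touch absent keys
lemma getD_foldl_insert_of_not_mem (l : List (String × List String))
    (d : PySem.Dict String (List String)) (k : String)
    (h : ∀ kv ∈ l, kv.1 ≠ k) :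
    (l.foldl (fun d' kv => d'.insert kv.1 (PySem.List.sorted kv.2 (fun x => x))) d).getD k []
      = d.getD k [] := by
  induction l generalizing d with
  | nil => rfl
  | cons kv t ih =>
    simp only [List.foldl_cons]
    rw [ih _ (fun x hx => h x (by simp [hx])), PySem.Dict.getD_insert]
    rw [if_neg (fun hk => h kv (by simp) hk.symm)]

-- a foldl of inserts keyed by a nodup list: lookup of a listed key gives its (sorted) value
lemma getD_foldl_insert_of_mem (l : List (String × List String))
    (d : PySem.Dict String (List String)) (k : String) (v : List String)
    (hnd : (l.map (·.1)).Nodup) (hm : (k, v) ∈ l) :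
    (l.foldl (fun d' kv => d'.insert kv.1 (PySem.List.sorted kv.2 (fun x => x))) d).getD k []
      = PySem.List.sorted v (fun x => x) := by
  induction l generalizing d with
  | nil => simp at hm
  | cons kv t ih =>
    simp only [List.map_cons, List.nodup_cons] at hnd
    rcases List.mem_cons.mp hm with heq | hmt
    · subst heq
      simp only [List.foldl_cons]
      rw [getD_foldl_insert_of_not_mem t _ k (fun x hx hk => hnd.1
        (show (k, v).1 ∈ List.map (fun q => q.1) t from hk ▸ List.mem_map_of_mem (f := fun q => q.1) hx))]
      rw [PySem.Dict.getD_insert, if_pos rfl]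
    · simp only [List.foldl_cons]
      exact ih _ hnd.2 hmt

-- updating a set with elements it already contains is a no-op
lemma set_update_self (s : PySem.Set String) (l : List String) (h : ∀ x ∈ l, x ∈ s) :
    PySem.Set.update s l = s := by
  induction l with
  | nil => rfl
  | cons x t ih =>
    have hx : s.contains x = true := by
      simpa using List.elem_eq_true_of_mem (h x (by simp))
    simp only [PySem.Set.update, List.foldl_cons, PySem.Set.add, hx, if_pos]
    exact ih (fun y hy => h y (by simp [hy]))

-- every partition name lies in the fixed key universe
lemma partition_mem_all (p : String) : partition_for_path p ∈ pvAllPartitions := by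
  simp only [partition_for_path]
  generalize ((PySem.Str.splitMax? p "/" 1).getD []).headD "" = f
  split
  · next h =>
    have hm : f ∈ pvPartitionKeys := List.mem_of_elem_eq_true h
    simp only [pvPartitionKeys, PySem.Set.mem_ofList, List.mem_cons, List.not_mem_nil,
      or_false] at hm
    rcases hm with rfl|rfl|rfl|rfl|rfl|rfl|rfl|rfl|rfl <;> simp [pvAllPartitions]
  · simp [pvAllPartitions]

-- the fixed key universe is strictly sorted
lemma all_partitions_sorted : pvAllPartitions.Pairwise (· < ·) := by
  rw [← List.isChain_iff_pairwise]
  exact List.isChain_cons_cons.mpr ⟨compare_gt_iff_gt.mp rfl,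
    List.isChain_cons_cons.mpr ⟨compare_gt_iff_gt.mp rfl,
    List.isChain_cons_cons.mpr ⟨compare_gt_iff_gt.mp rfl,
    List.isChain_cons_cons.mpr ⟨compare_gt_iff_gt.mp rfl,
    List.isChain_cons_cons.mpr ⟨compare_gt_iff_gt.mp rfl,
    List.isChain_cons_cons.mpr ⟨compare_gt_iff_gt.mp rfl,
    List.isChain_cons_cons.mpr ⟨compare_gt_iff_gt.mp rfl,
    List.isChain_cons_cons.mpr ⟨compare_gt_iff_gt.mp rfl,
    List.isChain_cons_cons.mpr ⟨compare_gt_iff_gt.mp rfl,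
    List.isChain_singleton _⟩⟩⟩⟩⟩⟩⟩⟩⟩

theorem group_paths_by_partition_py_eq_alt (paths : List String) :
    group_paths_by_partition_py paths = group_paths_by_partition_py_alt paths := by
  unfold group_paths_by_partition_py
  set pf := partition_for_path
  set grouped : PySem.Dict String (List String) :=
    paths.foldl (fun d path => d.modify (pf path) [] (fun v => v ++ [path])) PySem.Dict.empty
    with hgrouped
  set grouped2 : PySem.Dict String (List String) :=
    grouped.items.foldl (fun d kv => d.insert kv.1 (PySem.List.sorted kv.2 (fun x => x))) grouped
    with hgrouped2
  -- keys of grouped: distinct partitions in first-occurrence order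
  have hK : grouped.keys = PySem.Set.ofList (paths.map pf) := by
    rw [hgrouped, PySem.Dict.keys_foldl_modify_key paths pf [] (fun _ x => (fun v => v ++ [x]))]
    rfl
  have hKnd : grouped.keys.Nodup := by
    rw [hK]; exact PySem.Set.nodup_ofList _
  -- lookup in grouped: the unsorted bucket
  have hG : ∀ k, grouped.getD k [] = paths.filter (fun p => pf p == k) := by
    intro k
    rw [hgrouped]
    have hmap : paths.foldl (fun d path => d.modify (pf path) [] (fun v => v ++ [path])) PySem.Dict.empty
        = (paths.map (fun p => (pf p, p))).foldl (fun d q => d.modify q.1 [] (fun v => v ++ [q.2])) PySem.Dict.empty := by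
      rw [List.foldl_map]
    rw [hmap, PySem.Dict.getD_foldl_modify_append]
    simp [List.filter_map, Function.comp_def]
  have hI : grouped.items = grouped.keys.map (fun k => (k, grouped.getD k [])) :=
    PySem.Dict.items_eq_map_keys grouped hKnd []
  have hIkeys : grouped.items.map (·.1) = grouped.keys := by
    rw [hI, List.map_map]; simp [Function.comp_def]
  -- the second pass re-inserts every existing key in place
  have hK2 : grouped2.keys = grouped.keys := by
    rw [hgrouped2, PySem.Dict.keys_foldl_insert_key grouped.items (·.1)
      (fun _ kv => PySem.List.sorted kv.2 (fun x => x)) grouped, hIkeys]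
    exact set_update_self _ _ (fun x hx => hx)
  have hK2nd : grouped2.keys.Nodup := hK2 ▸ hKnd
  have hG2 : ∀ k ∈ grouped.keys, grouped2.getD k [] = pvBucket paths k := by
    intro k hk
    have hmem : (k, grouped.getD k []) ∈ grouped.items := by
      rw [hI]; exact List.mem_map_of_mem hk
    rw [hgrouped2, getD_foldl_insert_of_mem grouped.items grouped k _ (hIkeys ▸ hKnd) hmem, hG k]
    rfl
  have hI2 : grouped2.items = grouped.keys.map (fun k => (k, pvBucket paths k)) := by
    rw [PySem.Dict.items_eq_map_keys grouped2 hK2nd [], hK2]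
    exact List.map_congr_left (fun k hk => by rw [hG2 k hk])
  -- a partition occurs as a key iff its bucket is non-empty
  have hKmem : ∀ k, k ∈ grouped.keys ↔ ¬ (pvBucket paths k).isEmpty = true := by
    intro k
    rw [hK, PySem.Set.mem_ofList]
    constructor
    · intro hk
      rcases List.mem_map.mp hk with ⟨p, hp, rfl⟩
      have : p ∈ paths.filter (fun q => pf q == pf p) := List.mem_filter.mpr ⟨hp, by simp⟩
      have hne : paths.filter (fun q => pf q == pf p) ≠ [] := List.ne_nil_of_mem this
      simp only [pvBucket, List.isEmpty_iff]
      rw [PySem.List.sorted_eq_nil_iff]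
      exact hne
    · intro hne
      simp only [pvBucket, List.isEmpty_iff, PySem.List.sorted_eq_nil_iff] at hne
      rcases List.exists_mem_of_ne_nil _ hne with ⟨p, hp⟩
      rcases List.mem_filter.mp hp with ⟨hpp, hpk⟩
      exact List.mem_map.mpr ⟨p, hpp, by simpa using hpk⟩
  -- B's list is a strictly key-increasing rearrangement of grouped2.items
  have hperm : ((pvAllPartitions.filter (fun k => !(pvBucket paths k).isEmpty)).map
      (fun k => (k, pvBucket paths k))).Perm grouped2.items := by
    rw [hI2]
    refine List.Perm.map _ ?_
    have hallnd : pvAllPartitions.Nodup := all_partitions_sorted.imp ne_of_lt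
    refine (List.perm_ext_iff_of_nodup (List.Nodup.filter _ hallnd) hKnd).mpr ?_
    intro k
    rw [List.mem_filter, hKmem k]
    constructor
    · rintro ⟨_, hb⟩; simpa using hb
    · intro hk
      refine ⟨?_, by simpa using hk⟩
      have hkk : k ∈ paths.map pf := by
        have h2 := (hKmem k).mpr (by simpa using hk)
        rwa [hK, PySem.Set.mem_ofList] at h2
      rcases List.mem_map.mp hkk with ⟨p, hp, rfl⟩
      exact partition_mem_all p
  have hpw : ((pvAllPartitions.filter (fun k => !(pvBucket paths k).isEmpty)).map
      (fun k => (k, pvBucket paths k))).Pairwise (fun a b => a.1 < b.1) := by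
    rw [List.pairwise_map]
    exact (all_partitions_sorted.filter _)
  rw [PySem.List.sorted_eq_of_perm_of_pairwise_lt grouped2.items _ (fun kv => kv.1) hperm hpw,
    alt_eq_filter_map]

-- ===== VERDICT (by name: the statement is the Claim_ definition above) =====
theorem group_paths_by_partition_py_spec : Claim_equal_group_paths_by_partition_py := by
  intro paths _
  unfold Spec_group_paths_by_partition_py
  exact group_paths_by_partition_py_eq_alt paths
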